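-- pv_equiv track=rewrite | github.com/worldemar/parameters-optimizer | process_performance/parameter.py | _collapse_generator
-- ===== SOURCE A (Python) =====
-- def _collapse_generator(values: list):
--     """
--         Yields all values starting from edges towards center
--     """
--     values = list(values)
--     while True:
--         if values:
--             yield values.pop(0)
--         if values:
--             yield values.pop(-1)
--         if not values:
--             break
-- ===== SOURCE B (Python) =====
-- def _collapse_generator(values: list):
--     """
--         Yields all values starting from edges towards center
--     """
--     vals = list(values)
--     half = (len(vals) + 1) // 2
--     front = vals[:half]
--     back = vals[half:][::-1]
--     for i in range(len(front)):
--         yield front[i]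
--         if i < len(back):
--             yield back[i]
-- ===== Notes on version B (the rewrite author's own statement) =====
-- stated objective: faster
-- what changed: Replaces the destructive pop(0)/pop(-1) loop with a non-mutating split into a front half and a reversed back half interleaved in one index loop.
import Mathlib
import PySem

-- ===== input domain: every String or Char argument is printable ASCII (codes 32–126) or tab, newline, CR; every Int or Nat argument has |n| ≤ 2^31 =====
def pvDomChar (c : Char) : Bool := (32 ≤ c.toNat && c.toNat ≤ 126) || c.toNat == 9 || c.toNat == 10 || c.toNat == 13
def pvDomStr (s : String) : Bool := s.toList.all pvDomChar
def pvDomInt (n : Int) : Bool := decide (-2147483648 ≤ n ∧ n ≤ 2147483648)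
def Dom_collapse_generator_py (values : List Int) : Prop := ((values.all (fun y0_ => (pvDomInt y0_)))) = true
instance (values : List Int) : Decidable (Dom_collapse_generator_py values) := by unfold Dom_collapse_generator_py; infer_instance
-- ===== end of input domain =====

-- B replaces A's destructive pop(0)/pop(-1) loop by splitting the list into a front half and a
-- reversed back half and interleaving them in one O(n) pass, avoiding quadratic pop(0) shifting.


-- ===== PORT A =====
-- while True: pop(0) from the front, pop(-1) from the back, stop when empty.
def collapse_generator_py_loop : List Int → List Int
  | [] => []
  | x :: rest =>
    if h : rest = [] then [x]
    else x :: rest.getLast h :: collapse_generator_py_loop rest.dropLast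
termination_by l => l.length
decreasing_by simp [List.length_dropLast]

def collapse_generator_py (values : List Int) : List Int :=
  collapse_generator_py_loop values

-- ===== PORT B =====
-- for i in range(len(front)): yield front[i]; if i < len(back): yield back[i]
def collapse_generator_py_interleave : List Int → List Int → List Int
  | [], _ => []
  | f :: fs, [] => f :: collapse_generator_py_interleave fs []
  | f :: fs, b :: bs => f :: b :: collapse_generator_py_interleave fs bs

def collapse_generator_py_alt (values : List Int) : List Int :=
  let half := (values.length + 1) / 2
  collapse_generator_py_interleave (values.take half) ((values.drop half).reverse)

-- ===== PRECONDITION & SPEC =====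
def Spec_collapse_generator_py (values : List Int) (out : List Int) : Prop := out = collapse_generator_py_alt values
instance (values : List Int) (out : List Int) : Decidable (Spec_collapse_generator_py values out) := by unfold Spec_collapse_generator_py; infer_instance

-- ===== CLAIM (what is proved, stated in full; the proofs are below) =====
def Claim_equal_collapse_generator_py : Prop := ∀ (values : List Int), Dom_collapse_generator_py values → Spec_collapse_generator_py values (collapse_generator_py values)

-- ===== LEMMAS AND PROOFS =====

theorem collapse_generator_py_main :
    ∀ (n : ℕ) (v : List Int), v.length ≤ n →
      collapse_generator_py_loop v = collapse_generator_py_alt v := by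
  intro n
  induction n with
  | zero =>
    intro v hv
    have : v = [] := List.length_eq_zero_iff.mp (Nat.le_zero.mp hv)
    subst this
    simp [collapse_generator_py_loop, collapse_generator_py_alt,
      collapse_generator_py_interleave]
  | succ n ih =>
    intro v hv
    match v with
    | [] =>
      simp [collapse_generator_py_loop, collapse_generator_py_alt,
        collapse_generator_py_interleave]
    | x :: rest =>
      by_cases h : rest = []
      · subst h
        simp [collapse_generator_py_loop, collapse_generator_py_alt,
          collapse_generator_py_interleave]
      · -- rest = mid ++ [z]
        obtain ⟨mid, z, hmz⟩ : ∃ mid z, rest = mid ++ [z] := by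
          rcases List.eq_nil_or_concat rest with h' | ⟨mid, z, h'⟩
          · exact absurd h' h
          · exact ⟨mid, z, by simpa using h'⟩
        subst hmz
        rw [collapse_generator_py_loop.eq_def]
        simp only [dif_neg h]
        have hlast : (mid ++ [z]).getLast h = z := by
          simp
        have hdl : (mid ++ [z]).dropLast = mid := by
          simp
        rw [hlast, hdl]
        have hrec : collapse_generator_py_loop mid = collapse_generator_py_alt mid := by
          apply ih
          have := hv
          simp at this ⊢
          omega
        rw [hrec]
        unfold collapse_generator_py_alt
        have hle : (mid.length + 1) / 2 ≤ mid.length := by omega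
        have hhalf : ((x :: (mid ++ [z])).length + 1) / 2 = (mid.length + 1) / 2 + 1 := by
          simp; omega
        rw [hhalf]
        have htake : (x :: (mid ++ [z])).take ((mid.length + 1) / 2 + 1)
            = x :: mid.take ((mid.length + 1) / 2) := by
          rw [List.take_succ_cons, List.take_append_of_le_length hle]
        have hdrop : (x :: (mid ++ [z])).drop ((mid.length + 1) / 2 + 1)
            = mid.drop ((mid.length + 1) / 2) ++ [z] := by
          rw [List.drop_succ_cons, List.drop_append_of_le_length hle]
        simp only [htake, hdrop, List.reverse_append, List.reverse_singleton,
          List.singleton_append, collapse_generator_py_interleave]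

-- ===== VERDICT (by name: the statement is the Claim_ definition above) =====
theorem collapse_generator_py_spec : Claim_equal_collapse_generator_py := by
  intro values _
  unfold Spec_collapse_generator_py collapse_generator_py
  exact collapse_generator_py_main values.length values (le_refl _)
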